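-- pv_equiv track=rewrite | github.com/Kawser-nerd/CLCDSA | Source Codes/AtCoder/arc060/B/4921143.py | search_p
-- ===== SOURCE A (Python) =====
-- import math
--
-- def search_p(n,s):
--     for p in range(math.floor(math.sqrt(n))+1,0,-1):
--         b = (n-s)//p + 1
--         if b >1 :
--             q = n % b
--             if p+q ==s and q < b and n == p*b+q and p<b:
--                 return b
--
--     return -1
-- ===== SOURCE B (Python) =====
-- def search_p(n, s):
--     # n = p*b + q with p+q = s forces (b-1) to divide n-s; scan divisors of n-s.
--     m = n - s
--     if m <= 0:
--         return -1
--     divs = []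
--     i = 1
--     while i * i <= m:
--         if m % i == 0:
--             divs.append(i)
--             divs.append(m // i)
--         i += 1
--     for d in sorted(divs):
--         p = m // d
--         q = s - p
--         if p < d + 1 and 0 <= q < d + 1:
--             return d + 1
--     return -1
-- ===== Notes on version B (the rewrite author's own statement) =====
-- stated objective: alternative
-- what changed: Instead of scanning candidate first digits p = floor(sqrt(n))+1..1 and deriving a base from each, B uses the identity n-s = p*(b-1) to enumerate the divisors d of n-s (collected in pairs up to sqrt(n-s)), and returns the smallest d+1 whose digits p = (n-s)/d, q = s-p fit; same O(sqrt n) cost, no per-candidate re-verification of n = p*b+q.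
import Mathlib
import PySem

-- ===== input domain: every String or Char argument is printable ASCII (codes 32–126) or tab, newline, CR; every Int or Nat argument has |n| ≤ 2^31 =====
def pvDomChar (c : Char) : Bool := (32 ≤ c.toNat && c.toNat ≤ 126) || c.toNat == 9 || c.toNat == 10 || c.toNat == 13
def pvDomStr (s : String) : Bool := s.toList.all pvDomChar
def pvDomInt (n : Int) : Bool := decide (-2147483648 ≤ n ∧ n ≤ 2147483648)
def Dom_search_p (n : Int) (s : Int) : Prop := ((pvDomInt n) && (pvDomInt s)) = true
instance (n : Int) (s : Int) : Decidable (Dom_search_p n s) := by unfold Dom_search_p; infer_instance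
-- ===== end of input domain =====

-- B replaces A's scan over first digits p = sqrt(n)+1..1 by enumerating the divisors d of
-- n-s (since n = p*b+q, p+q = s force p*(b-1) = n-s) and returning the smallest fitting
-- base d+1; alternative algorithm of the same O(sqrt n) cost.

-- ===== PORT A =====
-- the loop 'for p in range(floor(sqrt(n))+1, 0, -1)'
def searchPLoopA (n : Int) (s : Int) : List Int → Int
  | [] => -1
  | p :: rest =>
    let b := PySem.Int.floordiv (n - s) p + 1
    if 1 < b then
      let q := PySem.Int.mod n b
      if p + q = s ∧ q < b ∧ n = p * b + q ∧ p < b then b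
      else searchPLoopA n s rest
    else searchPLoopA n s rest

-- math.floor(math.sqrt(n)) is ported as Int.sqrt n: exact for the admitted inputs
-- (0 ≤ n ≤ 2^31 < 2^52, where the double sqrt is correctly rounded)
def search_p (n : Int) (s : Int) : Int :=
  searchPLoopA n s (PySem.List.pyRange (Int.sqrt n + 1) 0 (-1))

-- ===== PORT B =====
-- the 'while i*i <= m' divisor-collecting loop of Source B (i, divs are the loop state;
-- the Nat fuel only makes the loop total: (m+1).toNat steps always outlast i*i ≤ m)
def searchPDivs (m : Int) : Nat → Int → List Int → List Int
  | 0, _, acc => acc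
  | fuel + 1, i, acc =>
    if i * i ≤ m then
      searchPDivs m fuel (i + 1)
        (acc ++ (if PySem.Int.mod m i = 0 then [i, PySem.Int.floordiv m i] else []))
    else acc

-- the 'for d in sorted(divs)' loop of Source B
def searchPLoopB (m : Int) (s : Int) : List Int → Int
  | [] => -1
  | d :: rest =>
    let p := PySem.Int.floordiv m d
    let q := s - p
    if p < d + 1 ∧ 0 ≤ q ∧ q < d + 1 then d + 1
    else searchPLoopB m s rest

def search_p_alt (n : Int) (s : Int) : Int :=
  let m := n - s
  if m ≤ 0 then -1
  else searchPLoopB m s (PySem.List.sorted (searchPDivs m (m + 1).toNat 1 []) (fun x => x) false)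

-- ===== PRECONDITION & SPEC =====
-- Pre_ excludes n < 0, where math.sqrt(n) raises ValueError in A.
def Pre_search_p (n : Int) (s : Int) : Prop := 0 ≤ n
instance (n : Int) (s : Int) : Decidable (Pre_search_p n s) := by unfold Pre_search_p; infer_instance
def pvWitness_search_p : Int × Int := (7, 3)

def Spec_search_p (n : Int) (s : Int) (out : Int) : Prop := out = search_p_alt n s
instance (n : Int) (s : Int) (out : Int) : Decidable (Spec_search_p n s out) := by unfold Spec_search_p; infer_instance

-- ===== CLAIM (what is proved, stated in full; the proofs are below) =====
def Claim_equal_search_p : Prop := ∀ (n : Int) (s : Int), Dom_search_p n s → Pre_search_p n s → Spec_search_p n s (search_p n s)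

-- ===== LEMMAS AND PROOFS =====

-- 'b is a valid base': n written in base b has exactly two digits p = n/b ≥ 1, q = n%b,
-- whose sum is s (Euclidean / and % coincide with Python's for the positive divisor b).
def PValid (n : Int) (s : Int) (b : Int) : Prop :=
  2 ≤ b ∧ 1 ≤ n / b ∧ n / b < b ∧ n / b + n % b = s

-- A's guard at p (both nested ifs combined), and the base it would return
def bOfP (n : Int) (s : Int) (p : Int) : Int := PySem.Int.floordiv (n - s) p + 1

def CondA (n : Int) (s : Int) (p : Int) : Prop :=
  1 < bOfP n s p ∧ (p + PySem.Int.mod n (bOfP n s p) = s ∧ PySem.Int.mod n (bOfP n s p) < bOfP n s p ∧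
    n = p * bOfP n s p + PySem.Int.mod n (bOfP n s p) ∧ p < bOfP n s p)

-- B's guard at a divisor d
def CondB (m : Int) (s : Int) (d : Int) : Prop :=
  PySem.Int.floordiv m d < d + 1 ∧ 0 ≤ s - PySem.Int.floordiv m d ∧ s - PySem.Int.floordiv m d < d + 1

theorem loopA_cons_pos (n s p : Int) (rest : List Int) (h : CondA n s p) :
    searchPLoopA n s (p :: rest) = bOfP n s p := by
  obtain ⟨h1, h2⟩ := h
  simp only [bOfP] at h1 h2
  simp only [searchPLoopA]
  rw [if_pos h1, if_pos h2]
  rfl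

theorem loopA_cons_neg (n s p : Int) (rest : List Int) (h : ¬ CondA n s p) :
    searchPLoopA n s (p :: rest) = searchPLoopA n s rest := by
  unfold CondA bOfP at h
  simp only [searchPLoopA]
  by_cases h1 : 1 < PySem.Int.floordiv (n - s) p + 1
  · rw [if_pos h1, if_neg (fun h2 => h ⟨h1, h2⟩)]
  · rw [if_neg h1]

theorem loopB_cons_pos (m s d : Int) (rest : List Int) (h : CondB m s d) :
    searchPLoopB m s (d :: rest) = d + 1 := by
  unfold CondB at h
  simp only [searchPLoopB]
  rw [if_pos h]

theorem loopB_cons_neg (m s d : Int) (rest : List Int) (h : ¬ CondB m s d) :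
    searchPLoopB m s (d :: rest) = searchPLoopB m s rest := by
  unfold CondB at h
  simp only [searchPLoopB]
  rw [if_neg h]

theorem ediv_antitone (n b1 b2 : Int) (hn : 0 ≤ n) (h1 : 0 < b1) (h : b1 ≤ b2) :
    n / b2 ≤ n / b1 := by
  have h2 : 0 < b2 := lt_of_lt_of_le h1 h
  rw [Int.le_ediv_iff_mul_le h1]
  calc n / b2 * b1 ≤ n / b2 * b2 := by
        have := Int.ediv_nonneg hn (le_of_lt h2); nlinarith
    _ ≤ n := by
        have := Int.emod_nonneg n (ne_of_gt h2)
        have := Int.mul_ediv_add_emod n b2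
        nlinarith

theorem le_sqrt_of_sq_le (p n : Int) (h0 : 0 ≤ p) (h : p * p ≤ n) : p ≤ Int.sqrt n := by
  unfold Int.sqrt
  have hn : 0 ≤ n := le_trans (mul_self_nonneg p) h
  have hp : p.toNat * p.toNat ≤ n.toNat := by
    zify; rw [Int.toNat_of_nonneg hn, Int.toNat_of_nonneg h0]; exact h
  have := (Nat.le_sqrt).2 hp
  omega

-- basic consequences of PValid
theorem pvalid_facts (n s b : Int) (h : PValid n s b) :
    0 ≤ n % b ∧ n % b < b ∧ n = (n / b) * b + n % b ∧ 2 ≤ n ∧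
    n - s = (n / b) * (b - 1) ∧ 1 ≤ n - s := by
  obtain ⟨hb, hp1, hpb, hsum⟩ := h
  have hb0 : 0 < b := by omega
  have hq0 : 0 ≤ n % b := Int.emod_nonneg n (ne_of_gt hb0)
  have hqb : n % b < b := Int.emod_lt_of_pos n hb0
  have hde : n = (n / b) * b + n % b := by
    have := Int.mul_ediv_add_emod n b; nlinarith
  refine ⟨hq0, hqb, hde, by nlinarith, by nlinarith, by nlinarith⟩

-- A's guard holds at p ⇒ the base it returns is valid and p = n / b
theorem condA_valid (n s p : Int) (hp : 1 ≤ p) (h : CondA n s p) :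
    PValid n s (bOfP n s p) ∧ n / bOfP n s p = p := by
  obtain ⟨hb1, hsum, hqb, hde, hpb⟩ := h
  set b := bOfP n s p with hbdef
  have hb0 : 0 < b := by omega
  rw [PySem.Int.mod_eq_emod_of_pos hb0] at hsum hqb hde
  have hq0 : 0 ≤ n % b := Int.emod_nonneg n (ne_of_gt hb0)
  -- from n = p*b + (n%b) with 0 ≤ n%b < b : n / b = p
  have hdiv : n / b = p := by
    rw [hde, add_comm]
    rw [Int.add_mul_ediv_right _ _ (ne_of_gt hb0), Int.ediv_eq_zero_of_lt hq0 hqb]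
    ring
  refine ⟨⟨by omega, by omega, by omega, by omega⟩, hdiv⟩

-- conversely, a valid base b is found by A exactly at p = n / b
theorem valid_condA (n s b : Int) (h : PValid n s b) :
    CondA n s (n / b) ∧ bOfP n s (n / b) = b := by
  obtain ⟨hq0, hqb, hde, hn2, hms, hms1⟩ := pvalid_facts n s b h
  obtain ⟨hb, hp1, hpb, hsum⟩ := h
  set p := n / b with hpdef
  have hp0 : 0 < p := by omega
  have hbof : bOfP n s p = b := by
    unfold bOfP
    rw [PySem.Int.floordiv_eq_ediv_of_pos hp0, hms, Int.mul_ediv_cancel_left _ (ne_of_gt hp0)]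
    ring
  refine ⟨?_, hbof⟩
  unfold CondA
  rw [hbof, PySem.Int.mod_eq_emod_of_pos (show (0:Int) < b by omega)]
  refine ⟨by omega, by omega, by omega, by nlinarith, by omega⟩

-- distinct valid bases have distinct (strictly antitone) first digits
theorem valid_digit_lt (n s b1 b2 : Int) (hn : 0 ≤ n)
    (h1 : PValid n s b1) (h2 : PValid n s b2) (hlt : b1 < b2) : n / b2 < n / b1 := by
  have hle : n / b2 ≤ n / b1 := ediv_antitone n b1 b2 hn (by obtain ⟨h, _⟩ := h1; omega) (le_of_lt hlt)
  rcases lt_or_eq_of_le hle with h | h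
  · exact h
  · exfalso
    have e1 := (valid_condA n s b1 h1).2
    have e2 := (valid_condA n s b2 h2).2
    rw [h] at e2
    omega

-- the first digit of a valid base lies in A's search range
theorem valid_digit_range (n s b : Int) (h : PValid n s b) :
    1 ≤ n / b ∧ n / b ≤ Int.sqrt n := by
  obtain ⟨hq0, hqb, hde, hn2, _, _⟩ := pvalid_facts n s b h
  obtain ⟨hb, hp1, hpb, hsum⟩ := h
  refine ⟨hp1, le_sqrt_of_sq_le _ _ (by omega) ?_⟩
  nlinarith

-- A's countdown loop: no hit
theorem loopA_range_none_aux (n s : Int) :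
    ∀ (k : Nat) (a : Int), a.toNat = k → (∀ p, 0 < p → p ≤ a → ¬ CondA n s p) →
      searchPLoopA n s (PySem.List.pyRange a 0 (-1)) = -1 := by
  intro k
  induction k with
  | zero =>
    intro a hk _
    rw [PySem.List.pyRange_neg_one_eq_nil (by omega)]
    rfl
  | succ k ih =>
    intro a hk h
    rw [PySem.List.pyRange_neg_one_cons (by omega), loopA_cons_neg _ _ _ _ (h a (by omega) le_rfl)]
    exact ih (a - 1) (by omega) (fun p h1 h2 => h p h1 (by omega))

theorem loopA_range_none (n s a : Int)
    (h : ∀ p, 0 < p → p ≤ a → ¬ CondA n s p) :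
    searchPLoopA n s (PySem.List.pyRange a 0 (-1)) = -1 :=
  loopA_range_none_aux n s a.toNat a rfl h

-- A's countdown loop: first (= largest-p) hit
theorem loopA_range_hit_aux (n s p₀ : Int) (hp0 : 0 < p₀) (hc : CondA n s p₀) :
    ∀ (k : Nat) (a : Int), (a - p₀).toNat = k → p₀ ≤ a →
      (∀ p, p₀ < p → p ≤ a → ¬ CondA n s p) →
      searchPLoopA n s (PySem.List.pyRange a 0 (-1)) = bOfP n s p₀ := by
  intro k
  induction k with
  | zero =>
    intro a hk hpa _
    have : a = p₀ := by omega
    subst this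
    rw [PySem.List.pyRange_neg_one_cons (by omega), loopA_cons_pos _ _ _ _ hc]
  | succ k ih =>
    intro a hk hpa hmax
    rw [PySem.List.pyRange_neg_one_cons (by omega), loopA_cons_neg _ _ _ _ (hmax a (by omega) le_rfl)]
    exact ih (a - 1) (by omega) (by omega) (fun p h1 h2 => hmax p h1 (by omega))

theorem loopA_range_hit (n s a p₀ : Int) (hp0 : 0 < p₀) (hpa : p₀ ≤ a)
    (hc : CondA n s p₀) (hmax : ∀ p, p₀ < p → p ≤ a → ¬ CondA n s p) :
    searchPLoopA n s (PySem.List.pyRange a 0 (-1)) = bOfP n s p₀ :=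
  loopA_range_hit_aux n s p₀ hp0 hc (a - p₀).toNat a rfl hpa hmax

-- B's scan loop: no hit
theorem loopB_none (m s : Int) (l : List Int) (h : ∀ d ∈ l, ¬ CondB m s d) :
    searchPLoopB m s l = -1 := by
  induction l with
  | nil => rfl
  | cons d rest ih =>
    rw [loopB_cons_neg _ _ _ _ (h d (List.mem_cons_self))]
    exact ih (fun x hx => h x (List.mem_cons_of_mem d hx))

-- B's scan loop over an ascending list returns the smallest hit
theorem loopB_first (m s : Int) (l : List Int) (d₀ : Int)
    (hsorted : l.Pairwise (· ≤ ·)) (hmem : d₀ ∈ l) (hc : CondB m s d₀)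
    (hmin : ∀ d ∈ l, CondB m s d → d₀ ≤ d) :
    searchPLoopB m s l = d₀ + 1 := by
  induction l with
  | nil => exact absurd hmem (List.not_mem_nil)
  | cons d rest ih =>
    rw [List.pairwise_cons] at hsorted
    by_cases hd : CondB m s d
    · rw [loopB_cons_pos _ _ _ _ hd]
      have h1 : d₀ ≤ d := hmin d (List.mem_cons_self) hd
      have h2 : d ≤ d₀ := by
        rcases List.mem_cons.mp hmem with h | h
        · omega
        · exact hsorted.1 d₀ h
      omega
    · rw [loopB_cons_neg _ _ _ _ hd]
      have hmem' : d₀ ∈ rest := by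
        rcases List.mem_cons.mp hmem with h | h
        · exact absurd (h ▸ hc) hd
        · exact h
      exact ih hsorted.2 hmem' (fun x hx => hmin x (List.mem_cons_of_mem d hx))

-- elements already collected stay in the result
theorem divs_acc_mono (m : Int) :
    ∀ (fuel : Nat) (i : Int) (acc : List Int) (d : Int), d ∈ acc →
      d ∈ searchPDivs m fuel i acc := by
  intro fuel
  induction fuel with
  | zero => intro i acc d hd; exact hd
  | succ fuel ih =>
    intro i acc d hd
    rw [searchPDivs]
    split
    · exact ih (i + 1) _ d (List.mem_append_left _ hd)
    · exact hd

-- every element of the divisor list is a positive divisor of m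
theorem divs_sound (m : Int) :
    ∀ (fuel : Nat) (i : Int) (acc : List Int) (d : Int), 1 ≤ i →
      (∀ x ∈ acc, x ∣ m ∧ 1 ≤ x) → d ∈ searchPDivs m fuel i acc → d ∣ m ∧ 1 ≤ d := by
  intro fuel
  induction fuel with
  | zero => intro i acc d hi hacc hd; exact hacc d hd
  | succ fuel ih =>
    intro i acc d hi hacc hd
    rw [searchPDivs] at hd
    by_cases hguard : i * i ≤ m
    · rw [if_pos hguard] at hd
      refine ih (i + 1) _ d (by omega) ?_ hd
      intro x hx
      rcases List.mem_append.mp hx with hx | hx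
      · exact hacc x hx
      · by_cases hdvd : PySem.Int.mod m i = 0
        · rw [if_pos hdvd] at hx
          have hdm : i ∣ m := (PySem.Int.mod_eq_zero_iff_dvd m i).mp hdvd
          have hi0 : 0 < i := by omega
          have hm1 : 1 ≤ m := by nlinarith
          simp only [List.mem_cons, List.not_mem_nil, or_false] at hx
          rcases hx with rfl | rfl
          · exact ⟨hdm, hi⟩
          · rw [PySem.Int.floordiv_eq_ediv_of_pos hi0]
            refine ⟨Int.ediv_dvd_of_dvd hdm, ?_⟩
            obtain ⟨c, hc⟩ := hdm
            rw [hc, Int.mul_ediv_cancel_left _ (ne_of_gt hi0)]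
            nlinarith
        · rw [if_neg hdvd] at hx
          exact absurd hx (List.not_mem_nil)
    · rw [if_neg hguard] at hd
      exact hacc d hd

-- a pair (j, m/j) with j*j ≤ m, j ∣ m is collected by the loop reaching any i ≤ j in time
theorem divs_pair_mem (m j : Int) (hj1 : 1 ≤ j) (hjj : j * j ≤ m) (hdvd : j ∣ m) :
    ∀ (fuel : Nat) (i : Int) (acc : List Int), 1 ≤ i → i ≤ j → (j - i).toNat < fuel →
      j ∈ searchPDivs m fuel i acc ∧ m / j ∈ searchPDivs m fuel i acc := by
  intro fuel
  induction fuel with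
  | zero => intro i acc hi hij hk; omega
  | succ fuel ih =>
    intro i acc hi hij hk
    have hguard : i * i ≤ m := by nlinarith
    rw [searchPDivs, if_pos hguard]
    by_cases hij' : i = j
    · subst hij'
      rw [if_pos ((PySem.Int.mod_eq_zero_iff_dvd m i).mpr hdvd),
          PySem.Int.floordiv_eq_ediv_of_pos (show (0:Int) < i by omega)]
      constructor <;>
        exact divs_acc_mono m fuel (i + 1) _ _ (List.mem_append_right _ (by simp))
    · exact ih (i + 1) _ (by omega) (by omega) (by omega)

-- every positive divisor of m ≥ 1 appears in the divisor list
theorem divs_complete (m d : Int) (hm : 1 ≤ m) (hd : 1 ≤ d) (hdvd : d ∣ m) :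
    d ∈ searchPDivs m (m + 1).toNat 1 [] := by
  have hdm : d ≤ m := Int.le_of_dvd (by omega) hdvd
  by_cases hdd : d * d ≤ m
  · exact (divs_pair_mem m d hd hdd hdvd (m + 1).toNat 1 [] le_rfl hd (by omega)).1
  · -- d is the large partner of c := m / d
    obtain ⟨c, hc⟩ := hdvd
    have hc1 : 1 ≤ c := by nlinarith
    have hcd : c ∣ m := ⟨d, by rw [hc]; ring⟩
    have hcm : c ≤ m := Int.le_of_dvd (by omega) hcd
    have hcc : c * c ≤ m := by nlinarith
    have hmc : m / c = d := by
      rw [hc, mul_comm, Int.mul_ediv_cancel_left _ (by omega : c ≠ 0)]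
    have := (divs_pair_mem m c hc1 hcc hcd (m + 1).toNat 1 [] le_rfl hc1 (by omega)).2
    rwa [hmc] at this

-- B's guard at a positive divisor d of m = n - s holds iff d+1 is a valid base
theorem condB_iff_valid (n s d : Int) (hd : 1 ≤ d) (hdvd : d ∣ (n - s)) (hm : 1 ≤ n - s) :
    CondB (n - s) s d ↔ PValid n s (d + 1) := by
  have hd0 : 0 < d := by omega
  obtain ⟨p, hp⟩ := hdvd
  have hfd : PySem.Int.floordiv (n - s) d = p := by
    rw [PySem.Int.floordiv_eq_ediv_of_pos hd0, hp, mul_comm,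
        Int.mul_ediv_cancel _ (ne_of_gt hd0)]
  have hp1 : 1 ≤ p := by nlinarith
  constructor
  · rintro ⟨h1, h2, h3⟩
    rw [hfd] at h1 h2 h3
    -- n = p*(d+1) + (s-p) with 0 ≤ s-p < d+1
    have hde : n = p * (d + 1) + (s - p) := by nlinarith
    have hdiv : n / (d + 1) = p := by
      rw [hde, add_comm, Int.add_mul_ediv_right _ _ (by omega : d + 1 ≠ 0),
          Int.ediv_eq_zero_of_lt (by omega) (by omega)]
      ring
    have hmod : n % (d + 1) = s - p := by
      have := Int.mul_ediv_add_emod n (d + 1)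
      rw [hdiv] at this; nlinarith
    exact ⟨by omega, by omega, by omega, by omega⟩
  · intro hv
    obtain ⟨hq0, hqb, hde, hn2, hms, hms1⟩ := pvalid_facts n s (d + 1) hv
    obtain ⟨_, hp1', hpb, hsum⟩ := hv
    ring_nf at hms
    have hcancel : n / (d + 1) * d = p * d := by
      have hp' := hp
      ring_nf at hp' ⊢
      linarith
    have hpe : n / (d + 1) = p := mul_right_cancel₀ (ne_of_gt hd0) hcancel
    unfold CondB
    rw [hfd, ← hpe]
    refine ⟨by omega, by omega, by omega⟩

-- the two branch-describing equalities assembled into the final theorem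
theorem search_p_eq (n s : Int) (hn : 0 ≤ n) : search_p n s = search_p_alt n s := by
  by_cases hex : ∃ b, PValid n s b
  · -- a valid base exists; both sides return the least one
    letI : DecidablePred (PValid n s) := fun b => by unfold PValid; infer_instance
    obtain ⟨b₀, hb₀, hleast⟩ := Int.exists_least_of_bdd
      (⟨2, fun z hz => hz.1⟩ : ∃ lb : Int, ∀ z, PValid n s z → lb ≤ z) hex
    obtain ⟨hq0, hqb, hde, hn2, hms, hms1⟩ := pvalid_facts n s b₀ hb₀
    obtain ⟨hcA, hbof⟩ := valid_condA n s b₀ hb₀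
    obtain ⟨hp1, hpsq⟩ := valid_digit_range n s b₀ hb₀
    -- A side
    have hA : search_p n s = b₀ := by
      rw [search_p, loopA_range_hit n s (Int.sqrt n + 1) (n / b₀) (by omega) (by omega) hcA ?_, hbof]
      intro p hplo hphi hcp
      obtain ⟨hv', hdiv'⟩ := condA_valid n s p (by omega) hcp
      set b' := bOfP n s p with hb'
      have hblt : b' < b₀ := by
        by_contra hge
        rcases lt_or_eq_of_le (not_lt.mp hge) with hlt | heq
        · have := valid_digit_lt n s b₀ b' hn hb₀ hv' hlt
          omega
        · rw [← heq] at hdiv'; omega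
      have := hleast b' hv'
      omega
    -- B side
    have hB : search_p_alt n s = b₀ := by
      have hd₀ : (b₀ - 1) ∣ (n - s) := ⟨n / b₀, by rw [hms]; ring⟩
      have hb2 : 2 ≤ b₀ := hb₀.1
      have hmem : b₀ - 1 ∈ searchPDivs (n - s) (n - s + 1).toNat 1 [] := divs_complete _ _ hms1 (by omega) hd₀
      rw [search_p_alt]
      simp only [if_neg (by omega : ¬ n - s ≤ 0)]
      rw [loopB_first (n - s) s _ (b₀ - 1)
            (by simpa using PySem.List.sorted_pairwise (searchPDivs (n - s) (n - s + 1).toNat 1 []) (fun x => x))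
            ((PySem.List.mem_sorted _ _ _ _).mpr hmem)
            ((condB_iff_valid n s (b₀ - 1) (by omega) hd₀ hms1).mpr (by simpa using hb₀))
            ?_]
      · omega
      · intro d hdmem hdc
        have hdmem' := (PySem.List.mem_sorted _ _ _ _).mp hdmem
        obtain ⟨hddvd, hd1⟩ := divs_sound (n - s) _ 1 [] d le_rfl (by simp) hdmem'
        have hv := (condB_iff_valid n s d hd1 hddvd hms1).mp hdc
        have := hleast (d + 1) hv
        omega
    rw [hA, hB]
  · -- no valid base: both sides return -1
    have hA : search_p n s = -1 := by
      rw [search_p]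
      apply loopA_range_none
      intro p hp0 hpa hcp
      exact hex ⟨_, (condA_valid n s p (by omega) hcp).1⟩
    have hB : search_p_alt n s = -1 := by
      rw [search_p_alt]
      by_cases hm : n - s ≤ 0
      · simp [hm]
      · simp only [if_neg hm]
        apply loopB_none
        intro d hdmem hdc
        have hdmem' := (PySem.List.mem_sorted _ _ _ _).mp hdmem
        obtain ⟨hddvd, hd1⟩ := divs_sound (n - s) _ 1 [] d le_rfl (by simp) hdmem'
        exact hex ⟨_, (condB_iff_valid n s d hd1 hddvd (by omega)).mp hdc⟩
    rw [hA, hB]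

-- ===== VERDICT (by name: the statement is the Claim_ definition above) =====
theorem search_p_spec : Claim_equal_search_p := by
  intro n s _hdom hpre
  unfold Spec_search_p
  exact search_p_eq n s hpre
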